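-- pv_equiv track=rewrite | github.com/mmtmn/primes-numbers-pattern | attempt1/tester.py | check_buckets
-- ===== SOURCE A (Python) =====
-- def is_prime(num):
--     if num <= 1:
--         return False
--     if num <= 3:
--         return True
--     if num % 2 == 0 or num % 3 == 0:
--         return False
--     i = 5
--     while i * i <= num:
--         if num % i == 0 or num % (i + 2) == 0:
--             return False
--         i += 6
--     return True
--
-- def check_buckets(n, num_buckets):
--     bucket_size = max(n // num_buckets, 1)  # Ensure bucket_size is at least 1
--     all_primes = [i for i in range(1, n + 1) if is_prime(i)]
--     prime_buckets = []
--     non_prime_buckets = []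
--
--     for i in range(0, n, bucket_size):
--         bucket = range(i + 1, min(i + bucket_size + 1, n + 1))
--         bucket_primes = [num for num in bucket if is_prime(num)]
--         bucket_non_primes = [num for num in bucket if not is_prime(num)]
--         if bucket_primes and not bucket_non_primes:
--             prime_buckets.append(bucket_primes)
--         elif not bucket_primes:
--             non_prime_buckets.append(bucket)
--
--     # Check if exactly one bucket contains all primes and no other buckets contain primes
--     if len(prime_buckets) == 1 and set(prime_buckets[0]) == set(all_primes) and all(len(bucket) == 0 for bucket in non_prime_buckets):
--         return True, prime_buckets[0], len(prime_buckets) + len(non_prime_buckets)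
--     return False, [], len(prime_buckets) + len(non_prime_buckets)
-- ===== SOURCE B (Python) =====
-- def _is_prime(num):
--     if num < 2:
--         return False
--     d = 2
--     while d * d <= num:
--         if num % d == 0:
--             return False
--         d += 1
--     return True
--
-- def check_buckets(n, num_buckets):
--     bucket_size = max(n // num_buckets, 1)
--     pure_prime = 0
--     pure_nonprime = 0
--     mixed = 0
--     prime_bucket = []
--     for lo in range(0, n, bucket_size):
--         hi = min(lo + bucket_size, n)
--         primes_here = [x for x in range(lo + 1, hi + 1) if _is_prime(x)]
--         if len(primes_here) == hi - lo:
--             pure_prime += 1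
--             prime_bucket = primes_here
--         elif not primes_here:
--             pure_nonprime += 1
--         else:
--             mixed += 1
--     if pure_prime == 1 and pure_nonprime == 0 and mixed == 0:
--         return True, prime_bucket, pure_prime + pure_nonprime
--     return False, [], pure_prime + pure_nonprime
-- ===== Notes on version B (the rewrite author's own statement) =====
-- stated objective: simpler
-- what changed: B replaces A's three materialised lists (all_primes, prime_buckets, non_prime_buckets) and the final set-equality test by a single pass that classifies each bucket by a prime count into three counters (pure-prime / pure-non-prime / mixed), keeping only the one candidate prime bucket; primality is plain trial division instead of A's 6k±1 wheel.
import Mathlib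
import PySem

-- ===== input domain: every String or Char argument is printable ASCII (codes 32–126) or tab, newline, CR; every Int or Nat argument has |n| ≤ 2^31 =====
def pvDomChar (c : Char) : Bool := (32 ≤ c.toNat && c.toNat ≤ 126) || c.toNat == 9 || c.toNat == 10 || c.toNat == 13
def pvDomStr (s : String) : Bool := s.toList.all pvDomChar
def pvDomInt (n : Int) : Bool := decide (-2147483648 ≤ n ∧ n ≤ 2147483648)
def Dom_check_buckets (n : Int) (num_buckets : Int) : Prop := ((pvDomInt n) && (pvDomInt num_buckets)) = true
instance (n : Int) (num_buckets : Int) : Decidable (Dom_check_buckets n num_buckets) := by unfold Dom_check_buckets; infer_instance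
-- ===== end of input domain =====

-- B replaces A's materialised lists (all_primes, prime_buckets, non_prime_buckets) and the
-- final set-equality test by one pass with three bucket counters, and uses plain trial
-- division instead of A's 6k±1 wheel (objective: simpler; not claimed faster).

-- ===== PORT A =====

def wheelLoop (num : Int) (i : Int) : Bool :=
  if i * i ≤ num then
    if PySem.Int.mod num i == 0 || PySem.Int.mod num (i + 2) == 0 then false
    else wheelLoop num (i + 6)
  else true
termination_by (num + 1 - i).toNat
decreasing_by
  have hi : i ≤ num := by nlinarith [mul_self_nonneg i]
  omega

def is_prime_A (num : Int) : Bool :=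
  if num ≤ 1 then false
  else if num ≤ 3 then true
  else if PySem.Int.mod num 2 == 0 || PySem.Int.mod num 3 == 0 then false
  else wheelLoop num 5

-- the body of A's 'for i in range(0, n, bucket_size)' loop
def bucketStep_A (n bucket_size : Int) (st : List (List Int) × List (List Int)) (i : Int) :
    List (List Int) × List (List Int) :=
  let bucket := PySem.List.pyRange (i + 1) (min (i + bucket_size + 1) (n + 1)) 1
  let bucket_primes := bucket.filter is_prime_A
  let bucket_non_primes := bucket.filter (fun x => !is_prime_A x)
  if !bucket_primes.isEmpty && bucket_non_primes.isEmpty then (st.1 ++ [bucket_primes], st.2)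
  else if bucket_primes.isEmpty then (st.1, st.2 ++ [bucket])
  else st

def check_buckets (n : Int) (num_buckets : Int) : Bool × List Int × Int :=
  let bucket_size := max (PySem.Int.floordiv n num_buckets) 1
  let all_primes := (PySem.List.pyRange 1 (n + 1) 1).filter is_prime_A
  let st := (PySem.List.pyRange 0 n bucket_size).foldl (bucketStep_A n bucket_size) ([], [])
  if st.1.length == 1
      && PySem.Set.equal (PySem.Set.ofList (st.1.headD [])) (PySem.Set.ofList all_primes)
      && st.2.all (fun b => b.length == 0) then
    (true, st.1.headD [], (st.1.length : Int) + (st.2.length : Int))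
  else (false, [], (st.1.length : Int) + (st.2.length : Int))

-- ===== PORT B =====

def trialLoop (num : Int) (d : Int) : Bool :=
  if d * d ≤ num then
    if PySem.Int.mod num d == 0 then false else trialLoop num (d + 1)
  else true
termination_by (num + 1 - d).toNat
decreasing_by
  have hd : d ≤ num := by nlinarith [mul_self_nonneg d]
  omega

def is_prime_B (num : Int) : Bool :=
  if num < 2 then false else trialLoop num 2

-- the body of B's 'for lo in range(0, n, bucket_size)' loop
def bucketStep_B (n bucket_size : Int) (st : Int × Int × Int × List Int) (lo : Int) :
    Int × Int × Int × List Int :=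
  let hi := min (lo + bucket_size) n
  let primes_here := (PySem.List.pyRange (lo + 1) (hi + 1) 1).filter is_prime_B
  if (primes_here.length : Int) == hi - lo then (st.1 + 1, st.2.1, st.2.2.1, primes_here)
  else if primes_here.isEmpty then (st.1, st.2.1 + 1, st.2.2.1, st.2.2.2)
  else (st.1, st.2.1, st.2.2.1 + 1, st.2.2.2)

def check_buckets_alt (n : Int) (num_buckets : Int) : Bool × List Int × Int :=
  let bucket_size := max (PySem.Int.floordiv n num_buckets) 1
  let st := (PySem.List.pyRange 0 n bucket_size).foldl (bucketStep_B n bucket_size) (0, 0, 0, [])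
  if st.1 == 1 && st.2.1 == 0 && st.2.2.1 == 0 then
    (true, st.2.2.2, st.1 + st.2.1)
  else (false, [], st.1 + st.2.1)

-- ===== PRECONDITION & SPEC =====
-- Pre_ excludes exactly num_buckets = 0, on which A's 'n // num_buckets' raises ZeroDivisionError.
def Pre_check_buckets (n : Int) (num_buckets : Int) : Prop := num_buckets ≠ 0
instance (n : Int) (num_buckets : Int) : Decidable (Pre_check_buckets n num_buckets) := by
  unfold Pre_check_buckets; infer_instance
def pvWitness_check_buckets : Int × Int := (10, 3)

def Spec_check_buckets (n : Int) (num_buckets : Int) (out : Bool × List Int × Int) : Prop := out = check_buckets_alt n num_buckets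
instance (n : Int) (num_buckets : Int) (out : Bool × List Int × Int) : Decidable (Spec_check_buckets n num_buckets out) := by unfold Spec_check_buckets; infer_instance

-- ===== CLAIM (what is proved, stated in full; the proofs are below) =====
def Claim_equal_check_buckets : Prop := ∀ (n : Int) (num_buckets : Int), Dom_check_buckets n num_buckets → Pre_check_buckets n num_buckets → Spec_check_buckets n num_buckets (check_buckets n num_buckets)

-- ===== LEMMAS AND PROOFS =====

theorem trial_char (num : Int) : ∀ d : Int, 1 ≤ d →
    (trialLoop num d = true ↔ ∀ e, d ≤ e → e * e ≤ num → ¬ (e ∣ num)) := by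
  intro d
  induction d using trialLoop.induct (num := num) with
  | case1 x h1 h2 =>
    intro _
    rw [trialLoop]
    simp only [h1, if_pos, h2, if_true, Bool.false_eq_true, false_iff]
    push_neg
    exact ⟨x, le_refl x, h1, by simpa [PySem.Int.mod_eq_zero_iff_dvd] using h2⟩
  | case2 x h1 h2 ih =>
    intro hx
    rw [trialLoop]
    simp only [h1, if_pos, h2, if_false, Bool.false_eq_true, ite_false]
    rw [ih (by omega)]
    constructor
    · intro h e he hee
      rcases eq_or_lt_of_le he with rfl | hlt
      · simpa [PySem.Int.mod_eq_zero_iff_dvd] using h2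
      · exact h e (by omega) hee
    · intro h e he hee
      exact h e (by omega) hee
  | case3 x h1 =>
    intro hx
    rw [trialLoop]
    simp only [h1, if_neg, if_false]
    simp only [true_iff]
    intro e he hee hdvd
    have : x * x ≤ e * e := by nlinarith
    omega

theorem wheel_char (num : Int) : ∀ i : Int, 1 ≤ i →
    (wheelLoop num i = true ↔
      ∀ j : Int, i ≤ j → (6 : Int) ∣ j - i → j * j ≤ num →
        ¬ (j ∣ num) ∧ ¬ ((j + 2) ∣ num)) := by
  intro i
  induction i using wheelLoop.induct (num := num) with
  | case1 x h1 h2 =>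
    intro hx
    rw [wheelLoop]
    simp only [h1, if_pos, h2, if_true, Bool.false_eq_true, false_iff]
    push_neg
    refine ⟨x, le_refl x, by simp, h1, ?_⟩
    rcases Bool.or_eq_true_iff.mp h2 with h | h
    · intro hc; exact absurd (by simpa [PySem.Int.mod_eq_zero_iff_dvd] using h) (by simpa using hc)
    · intro _; simpa [PySem.Int.mod_eq_zero_iff_dvd] using h
  | case2 x h1 h2 ih =>
    intro hx
    rw [wheelLoop]
    simp only [h1, if_pos, h2, if_false, Bool.false_eq_true, ite_false]
    rw [ih (by omega)]
    have hh : ¬ PySem.Int.mod num x = 0 ∧ ¬ PySem.Int.mod num (x + 2) = 0 := by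
      simpa using h2
    constructor
    · intro h j hj hdvd hjj
      rcases eq_or_lt_of_le hj with rfl | hlt
      · exact ⟨fun hc => hh.1 ((PySem.Int.mod_eq_zero_iff_dvd _ _).mpr hc),
          fun hc => hh.2 ((PySem.Int.mod_eq_zero_iff_dvd _ _).mpr hc)⟩
      · have hj6 : x + 6 ≤ j := by
          rcases hdvd with ⟨c, hc⟩
          have : 1 ≤ c := by nlinarith
          omega
        exact h j hj6 (by rcases hdvd with ⟨c, hc⟩; exact ⟨c - 1, by omega⟩) hjj
    · intro h j hj hdvd hjj
      exact h j (by omega) (by rcases hdvd with ⟨c, hc⟩; exact ⟨c + 1, by omega⟩) hjj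
  | case3 x h1 =>
    intro hx
    rw [wheelLoop]
    simp only [h1, if_neg, if_false, true_iff]
    intro j hj _ hjj
    exfalso
    have : x * x ≤ j * j := by nlinarith
    omega

theorem is_prime_eq (k : Int) : is_prime_A k = is_prime_B k := by
  unfold is_prime_A is_prime_B
  by_cases h1 : k ≤ 1
  · simp [h1, show k < 2 by omega]
  · by_cases h3 : k ≤ 3
    · have hk : k = 2 ∨ k = 3 := by omega
      rcases hk with rfl | rfl <;>
        · rw [trialLoop]; norm_num
    · have h1' : ¬ k ≤ 1 := h1
      have h2' : ¬ k < 2 := by omega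
      simp only [h1', h3, h2', if_false, ite_false]
      by_cases hd : PySem.Int.mod k 2 = 0 ∨ PySem.Int.mod k 3 = 0
      · have hcond : (PySem.Int.mod k 2 == 0 || PySem.Int.mod k 3 == 0) = true := by
          rcases hd with h | h <;> rw [h] <;> simp
        rw [hcond]
        have hex : ∃ e : Int, 2 ≤ e ∧ e * e ≤ k ∧ e ∣ k := by
          rcases hd with h | h
          · exact ⟨2, by omega, by omega, (PySem.Int.mod_eq_zero_iff_dvd _ _).mp h⟩
          · have h3d : (3 : Int) ∣ k := (PySem.Int.mod_eq_zero_iff_dvd _ _).mp h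
            by_cases h2d : (2 : Int) ∣ k
            · exact ⟨2, by omega, by omega, h2d⟩
            · exact ⟨3, by omega, by omega, h3d⟩
        cases htl : trialLoop k 2 with
        | false => simp
        | true =>
          exfalso
          rcases hex with ⟨e, he2, hee, hed⟩
          exact ((trial_char k 2 (by omega)).mp htl) e he2 hee hed
      · push_neg at hd
        have hn2 : ¬ (2 : Int) ∣ k := fun hc => hd.1 ((PySem.Int.mod_eq_zero_iff_dvd _ _).mpr hc)
        have hn3 : ¬ (3 : Int) ∣ k := fun hc => hd.2 ((PySem.Int.mod_eq_zero_iff_dvd _ _).mpr hc)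
        have hcond : (PySem.Int.mod k 2 == 0 || PySem.Int.mod k 3 == 0) = false := by
          simp only [Bool.or_eq_false_iff, beq_eq_false_iff_ne, ne_eq]
          exact ⟨hd.1, hd.2⟩
        rw [hcond]
        simp only [Bool.false_eq_true, ite_false]
        rw [Bool.eq_iff_iff, wheel_char k 5 (by omega), trial_char k 2 (by omega)]
        constructor
        · -- wheel has no divisor → trial has no divisor
          intro hW e he2 hee hed
          have he0 : 0 ≤ e := by omega
          set en := e.toNat with hen
          have hene : (en : Int) = e := Int.toNat_of_nonneg he0
          have hen2 : 2 ≤ en := by omega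
          have hp : (Nat.minFac en).Prime := Nat.minFac_prime (by omega)
          set p := Nat.minFac en with hpdef
          have hple : p ≤ en := Nat.minFac_le (by omega)
          have hpd : (p : Int) ∣ k := by
            refine dvd_trans ?_ hed
            rw [← hene]
            exact_mod_cast Nat.minFac_dvd en
          have hp2 : p ≠ 2 := fun hc => hn2 (by rw [hc] at hpd; exact_mod_cast hpd)
          have hp3 : p ≠ 3 := fun hc => hn3 (by rw [hc] at hpd; exact_mod_cast hpd)
          have hnd2 : ¬ 2 ∣ p := fun hc =>
            hp2 ((Nat.prime_dvd_prime_iff_eq Nat.prime_two hp).mp hc).symm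
          have hnd3 : ¬ 3 ∣ p := fun hc =>
            hp3 ((Nat.prime_dvd_prime_iff_eq Nat.prime_three hp).mp hc).symm
          have hple2 : 2 ≤ p := hp.two_le
          have hmod : p % 6 = 1 ∨ p % 6 = 5 := by omega
          have hpp : (p : Int) * (p : Int) ≤ k := by
            have : (p : Int) ≤ e := by rw [← hene]; exact_mod_cast hple
            nlinarith
          rcases hmod with hm | hm
          · -- p ≡ 1 [6]: p = j + 2 with j ≡ 5 [6]
            have hp7 : 7 ≤ p := by omega
            have := hW ((p : Int) - 2) (by omega) (by omega)
              (by nlinarith [Int.natCast_nonneg p])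
            exact this.2 (by simpa using hpd)
          · have := hW (p : Int) (by omega) (by omega) hpp
            exact this.1 hpd
        · -- trial has no divisor → wheel has no divisor
          intro hT j hj5 _ hjj
          have hk0 : 0 < k := by omega
          refine ⟨hT j (by omega) hjj, ?_⟩
          intro hdp
          by_cases hbig : (j + 2) * (j + 2) ≤ k
          · exact hT (j + 2) (by omega) hbig hdp
          · push_neg at hbig
            obtain ⟨c, hc⟩ := hdp
            have hjpos : 0 < j + 2 := by omega
            have hcpos : 0 < c := by nlinarith
            have hc1 : c ≠ 1 := by
              intro hc1; rw [hc1, mul_one] at hc; nlinarith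
            have hclt : c < j + 2 := by nlinarith
            have hcd : c ∣ k := ⟨j + 2, by linarith [hc, mul_comm (j+2) c]⟩
            exact hT c (by omega) (by nlinarith) hcd

theorem pv_foldl_rel {α β γ : Type} (f : α → γ → α) (g : β → γ → β) (R : α → β → Prop) :
    ∀ (L : List γ) (a : α) (b : β),
      (∀ a b x, x ∈ L → R a b → R (f a x) (g b x)) → R a b → R (L.foldl f a) (L.foldl g b) := by
  intro L
  induction L with
  | nil => intro a b _ hR; exact hR
  | cons x xs ih =>
    intro a b hstep hR
    exact ih (f a x) (g b x) (fun a b y hy => hstep a b y (List.mem_cons_of_mem _ hy))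
      (hstep a b x (List.mem_cons_self) hR)

theorem pv_pyRange_cons {a b s : Int} (hs : 0 < s) (hab : a < b) :
    PySem.List.pyRange a b s = a :: PySem.List.pyRange (a + s) b s := by
  rw [PySem.List.pyRange_of_pos a b hs, PySem.List.pyRange_of_pos (a + s) b hs, if_pos hab]
  have hN : ((b - a + s - 1) / s).toNat
      = (if a + s < b then ((b - (a + s) + s - 1) / s).toNat else 0) + 1 := by
    by_cases h : a + s < b
    · rw [if_pos h]
      have he : b - a + s - 1 = (b - (a + s) + s - 1) + 1 * s := by ring
      rw [he, Int.add_mul_ediv_right _ _ (by omega)]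
      have h0 : 0 ≤ (b - (a + s) + s - 1) / s := Int.ediv_nonneg (by omega) (by omega)
      omega
    · rw [if_neg h]
      have e1 : 1 ≤ (b - a + s - 1) / s := by rw [Int.le_ediv_iff_mul_le hs]; omega
      have e2 : (b - a + s - 1) / s < 2 := by rw [Int.ediv_lt_iff_lt_mul hs]; omega
      omega
  rw [hN, List.range_succ_eq_map]
  simp only [List.map_cons, List.map_map]
  congr 1
  · ring
  · exact List.map_congr_left (fun k _ => by simp [Function.comp]; push_cast; ring)

theorem pv_pyRange_empty {a b s : Int} (hs : 0 < s) (hab : b ≤ a) :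
    PySem.List.pyRange a b s = [] := by
  rw [PySem.List.pyRange_of_pos a b hs, if_neg (by omega)]
  simp

theorem pv_bucket_eq (n bs i : Int) :
    PySem.List.pyRange (i + 1) (min (i + bs + 1) (n + 1)) 1
      = PySem.List.pyRange (i + 1) (min (i + bs) n + 1) 1 := by
  congr 1
  omega

theorem pv_filter_eq (l : List Int) : l.filter is_prime_B = l.filter is_prime_A :=
  List.filter_congr (fun x _ => (is_prime_eq x).symm)

theorem pv_c1_iff (n bs i : Int) (hbs : 1 ≤ bs) (hi0 : 0 ≤ i) (hin : i < n) :
    (!((PySem.List.pyRange (i + 1) (min (i + bs) n + 1) 1).filter is_prime_A).isEmpty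
        && ((PySem.List.pyRange (i + 1) (min (i + bs) n + 1) 1).filter (fun x => !is_prime_A x)).isEmpty)
      = ((((PySem.List.pyRange (i + 1) (min (i + bs) n + 1) 1).filter is_prime_A).length : Int) == min (i + bs) n - i) := by
  set bkt := PySem.List.pyRange (i + 1) (min (i + bs) n + 1) 1 with hbkt
  have hlen : (bkt.length : Int) = min (i + bs) n - i := by
    rw [hbkt, PySem.List.length_pyRange_one]; omega
  rw [Bool.eq_iff_iff]
  simp only [Bool.and_eq_true, Bool.not_eq_eq_eq_not, Bool.not_true, List.isEmpty_eq_false_iff,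
    List.isEmpty_iff, beq_iff_eq]
  constructor
  · rintro ⟨-, hnp⟩
    have hall : ∀ x ∈ bkt, is_prime_A x = true := by
      intro x hx
      have := List.filter_eq_nil_iff.mp hnp x hx
      simpa using this
    rw [List.filter_eq_self.mpr hall, hlen]
  · intro hl
    have hfl : (bkt.filter is_prime_A).length = bkt.length := by omega
    have hall : ∀ x ∈ bkt, is_prime_A x = true := by
      by_contra hc
      push_neg at hc
      obtain ⟨x, hx, hpx⟩ := hc
      have := List.length_filter_lt_length_iff_exists.mpr ⟨x, hx, hpx⟩
      omega
    constructor
    · rw [List.filter_eq_self.mpr hall]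
      intro hnil
      rw [hnil] at hlen
      simp at hlen
      omega
    · exact List.filter_eq_nil_iff.mpr (fun a ha => by simp [hall a ha])

theorem pv_step_rel (n bs : Int) (hbs : 1 ≤ bs) (sA : List (List Int) × List (List Int))
    (sB : Int × Int × Int × List Int) (i : Int) (hi0 : 0 ≤ i) (hin : i < n)
    (h1 : sB.1 = (sA.1.length : Int)) (h2 : sB.2.1 = (sA.2.length : Int)) :
    (bucketStep_B n bs sB i).1 = ((bucketStep_A n bs sA i).1.length : Int) ∧
    (bucketStep_B n bs sB i).2.1 = ((bucketStep_A n bs sA i).2.length : Int) := by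
  unfold bucketStep_A bucketStep_B
  simp only [pv_bucket_eq n bs i, pv_filter_eq]
  rw [pv_c1_iff n bs i hbs hi0 hin]
  split_ifs with hc1 hc2
  · simp [h1, h2]
  · simp [h1, h2]
  · exact ⟨h1, h2⟩

theorem pv_condB_false (n bs : Int) (hbs : 1 ≤ bs) :
    (((PySem.List.pyRange 0 n bs).foldl (bucketStep_B n bs) (0, 0, 0, [])).1 == 1
      && ((PySem.List.pyRange 0 n bs).foldl (bucketStep_B n bs) (0, 0, 0, [])).2.1 == 0
      && ((PySem.List.pyRange 0 n bs).foldl (bucketStep_B n bs) (0, 0, 0, [])).2.2.1 == 0) = false := by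
  by_cases hn : n ≤ 0
  · rw [pv_pyRange_empty (by omega) hn]
    simp
  · push_neg at hn
    rw [pv_pyRange_cons (by omega) (by omega)]
    simp only [List.foldl_cons]
    have hsum0 : 1 ≤ (bucketStep_B n bs (0, 0, 0, []) 0).2.1 + (bucketStep_B n bs (0, 0, 0, []) 0).2.2.1 := by
      simp only [bucketStep_B]
      have h1m : (1 : Int) ∈ PySem.List.pyRange (0 + 1) (min (0 + bs) n + 1) 1 := by
        rw [PySem.List.mem_pyRange_one]; omega
      have hlt : ((PySem.List.pyRange (0 + 1) (min (0 + bs) n + 1) 1).filter is_prime_B).length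
          < (PySem.List.pyRange (0 + 1) (min (0 + bs) n + 1) 1).length :=
        List.length_filter_lt_length_iff_exists.mpr ⟨1, h1m, by simp [is_prime_B]⟩
      have hlen : ((PySem.List.pyRange (0 + 1) (min (0 + bs) n + 1) 1).length : Int)
          = min (0 + bs) n - 0 := by rw [PySem.List.length_pyRange_one]; omega
      have hd1 : ((((PySem.List.pyRange (0 + 1) (min (0 + bs) n + 1) 1).filter is_prime_B).length : Int)
          == min (0 + bs) n - 0) = false := by
        simp only [beq_eq_false_iff_ne, ne_eq]
        omega
      rw [hd1]
      split_ifs <;> simp_all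
    have hinv := List.foldlRecOn (PySem.List.pyRange (0 + bs) n bs) (bucketStep_B n bs)
      (b := bucketStep_B n bs (0, 0, 0, []) 0)
      (motive := fun s => 1 ≤ s.2.1 + s.2.2.1) hsum0
      (fun b hb a _ => by
        simp only [bucketStep_B]
        dsimp only at hb ⊢
        split_ifs <;> simp <;> omega)
    by_contra hc
    simp only [Bool.not_eq_false, Bool.and_eq_true, beq_iff_eq] at hc
    obtain ⟨⟨h1, h2⟩, h3⟩ := hc
    omega

theorem pv_condA_false (n bs : Int) (hbs : 1 ≤ bs) :
    (((PySem.List.pyRange 0 n bs).foldl (bucketStep_A n bs) ([], [])).1.length == 1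
      && PySem.Set.equal
           (PySem.Set.ofList (((PySem.List.pyRange 0 n bs).foldl (bucketStep_A n bs) ([], [])).1.headD []))
           (PySem.Set.ofList ((PySem.List.pyRange 1 (n + 1) 1).filter is_prime_A))
      && ((PySem.List.pyRange 0 n bs).foldl (bucketStep_A n bs) ([], [])).2.all
           (fun b => b.length == 0)) = false := by
  by_cases hn : n ≤ 0
  · rw [pv_pyRange_empty (by omega) hn]
    simp
  · push_neg at hn
    rw [pv_pyRange_cons (by omega) (by omega)]
    simp only [List.foldl_cons]
    set B0 := PySem.List.pyRange (0 + 1) (min (0 + bs + 1) (n + 1)) 1 with hB0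
    have h1m : (1 : Int) ∈ B0 := by rw [hB0, PySem.List.mem_pyRange_one]; omega
    have hbnp : (1 : Int) ∈ B0.filter (fun x => !is_prime_A x) :=
      List.mem_filter.mpr ⟨h1m, by simp [is_prime_A]⟩
    have hc1 : (!(B0.filter is_prime_A).isEmpty && (B0.filter (fun x => !is_prime_A x)).isEmpty) = false := by
      have h := List.isEmpty_eq_false_iff.mpr (List.ne_nil_of_mem hbnp)
      simp [h]
    have hstep0 : bucketStep_A n bs ([], []) 0
        = if (B0.filter is_prime_A).isEmpty then (([] : List (List Int)), [B0]) else ([], []) := by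
      simp only [bucketStep_A, ← hB0, hc1]
      simp
    by_cases hbp : (B0.filter is_prime_A).isEmpty
    · rw [hstep0, if_pos hbp]
      have hmem := List.foldlRecOn (PySem.List.pyRange (0 + bs) n bs) (bucketStep_A n bs)
        (b := (([] : List (List Int)), [B0]))
        (motive := fun s => B0 ∈ s.2) (List.mem_singleton.mpr rfl)
        (fun b hb a _ => by
          simp only [bucketStep_A]
          dsimp only at hb ⊢
          split_ifs <;> first | exact hb | exact List.mem_append_left _ hb)
      by_contra hc
      simp only [Bool.not_eq_false, Bool.and_eq_true, List.all_eq_true, beq_iff_eq] at hc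
      have hB0len := hc.2 B0 hmem
      have hB0nil : B0 = [] := List.length_eq_zero_iff.mp hB0len
      rw [hB0nil] at h1m
      simp at h1m
    · rw [hstep0, if_neg hbp]
      have hne : B0.filter is_prime_A ≠ [] := fun hnil => hbp (by simp [hnil])
      obtain ⟨q, hq⟩ := List.exists_mem_of_ne_nil _ hne
      have hqB0 : q ∈ B0 ∧ is_prime_A q = true := by
        have := List.mem_filter.mp hq; exact ⟨this.1, this.2⟩
      have hqb : 1 ≤ q ∧ q ≤ bs ∧ q ≤ n := by
        have := PySem.List.mem_pyRange_one.mp (hB0 ▸ hqB0.1)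
        omega
      have hinv := List.foldlRecOn (PySem.List.pyRange (0 + bs) n bs) (bucketStep_A n bs)
        (b := (([] : List (List Int)), ([] : List (List Int))))
        (motive := fun s => ∀ l ∈ s.1, ∀ x ∈ l, bs + 1 ≤ x) (by simp)
        (fun b hb a ha => by
          have hage : 0 + bs ≤ a := (PySem.List.mem_pyRange_iff_of_pos (by omega) a |>.mp ha).1
          simp only [bucketStep_A]
          dsimp only at hb ⊢
          split_ifs with h1 h2
          · intro l hl x hx
            rcases List.mem_append.mp hl with hl | hl
            · exact hb l hl x hx
            · rw [List.mem_singleton.mp hl] at hx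
              have := PySem.List.mem_pyRange_one.mp (List.mem_filter.mp hx).1
              omega
          · exact hb
          · exact hb)
      by_contra hc
      simp only [Bool.not_eq_false, Bool.and_eq_true, beq_iff_eq] at hc
      obtain ⟨l, hl⟩ := List.length_eq_one_iff.mp hc.1.1
      have hqall : q ∈ (PySem.List.pyRange 1 (n + 1) 1).filter is_prime_A :=
        List.mem_filter.mpr ⟨PySem.List.mem_pyRange_one.mpr (by omega), hqB0.2⟩
      have hset := (PySem.Set.equal_iff _ _).mp hc.1.2 q
      rw [hl] at hset
      simp only [List.headD_cons] at hset
      have hql : q ∈ l := by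
        rw [PySem.Set.mem_ofList, PySem.Set.mem_ofList] at hset
        exact hset.mpr hqall
      have := hinv l (by rw [hl]; exact List.mem_singleton.mpr rfl) q hql
      omega

theorem pv_main (n nb : Int) : check_buckets n nb = check_buckets_alt n nb := by
  simp only [check_buckets, check_buckets_alt]
  have hbs1 : (1 : Int) ≤ max (PySem.Int.floordiv n nb) 1 := le_max_right _ _
  set bs := max (PySem.Int.floordiv n nb) 1 with hbs
  have hRel := pv_foldl_rel (bucketStep_A n bs) (bucketStep_B n bs)
    (fun sA sB => sB.1 = (sA.1.length : Int) ∧ sB.2.1 = (sA.2.length : Int))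
    (PySem.List.pyRange 0 n bs) ([], []) (0, 0, 0, [])
    (fun a b x hx hR => by
      have hm := (PySem.List.mem_pyRange_iff_of_pos (by omega) x).mp hx
      exact pv_step_rel n bs hbs1 a b x hm.1 hm.2.1 hR.1 hR.2)
    (by simp)
  rw [pv_condA_false n bs hbs1, pv_condB_false n bs hbs1]
  simp only [Bool.false_eq_true, if_false]
  rw [hRel.1, hRel.2]

-- ===== VERDICT (by name: the statement is the Claim_ definition above) =====
theorem check_buckets_spec : Claim_equal_check_buckets := by
  intro n num_buckets _ _
  unfold Spec_check_buckets
  exact pv_main n num_buckets
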